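-- pv_equiv track=rewrite | github.com/Raptiler/ReportTools | ReportTools.py | compare_cookies
-- ===== SOURCE A (Python) =====
-- def compare_cookies(cookies1, cookies2):
--     differences = {}
--     for key in cookies1:
--         if key in cookies2:
--             if cookies1[key] != cookies2[key]:
--                 differences[key] = (cookies1[key], cookies2[key])
--         else:
--             differences[key] = (cookies1[key], None)
--     for key in cookies2:
--         if key not in cookies1:
--             differences[key] = (None, cookies2[key])
--     return differences
-- ===== SOURCE B (Python) =====
-- def compare_cookies(cookies1, cookies2):
--     merged = {key: (cookies1.get(key), cookies2.get(key)) for key in {**cookies1, **cookies2}}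
--     return {key: pair for key, pair in merged.items() if pair[0] != pair[1]}
-- ===== Notes on version B (the rewrite author's own statement) =====
-- stated objective: alternative
-- what changed: Replaces A's two conditional-insert loops mutating a shared dict by two declarative stages: first materialize the full outer-join table {key: (c1.get(key), c2.get(key))} over the merged key set {**c1, **c2}, then prune the rows whose two sides are equal.
import Mathlib
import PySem

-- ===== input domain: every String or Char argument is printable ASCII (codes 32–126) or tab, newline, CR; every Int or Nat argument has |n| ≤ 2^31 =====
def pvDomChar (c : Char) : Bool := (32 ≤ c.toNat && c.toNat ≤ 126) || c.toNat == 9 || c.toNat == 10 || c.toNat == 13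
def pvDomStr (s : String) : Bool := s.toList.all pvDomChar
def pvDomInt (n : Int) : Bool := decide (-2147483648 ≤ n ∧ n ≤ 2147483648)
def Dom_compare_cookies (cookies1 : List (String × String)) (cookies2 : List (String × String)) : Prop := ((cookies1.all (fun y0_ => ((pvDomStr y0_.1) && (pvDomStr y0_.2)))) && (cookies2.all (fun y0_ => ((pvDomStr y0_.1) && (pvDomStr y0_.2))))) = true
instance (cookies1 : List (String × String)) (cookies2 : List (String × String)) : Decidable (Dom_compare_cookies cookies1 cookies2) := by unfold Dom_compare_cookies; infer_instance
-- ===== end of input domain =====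

-- B replaces A's two conditional-insert loops by two declarative stages: materialize the
-- full outer-join table over the merged key set, then prune the rows whose sides are equal.

-- ===== PORT A =====
-- cookies1[key] / cookies2[key] with key drawn from that dict's own keys never raises: ported as getD _ ""
def compare_cookies (cookies1 : List (String × String)) (cookies2 : List (String × String)) : List (String × Option String × Option String) :=
  let d1 := PySem.Dict.ofList cookies1
  let d2 := PySem.Dict.ofList cookies2
  let differences : PySem.Dict String (Option String × Option String) :=
    d1.keys.foldl (fun diffs key =>
      if d2.contains key then
        if d1.getD key "" ≠ d2.getD key "" then
          diffs.insert key (some (d1.getD key ""), some (d2.getD key ""))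
        else diffs
      else diffs.insert key (some (d1.getD key ""), none)) PySem.Dict.empty
  let differences :=
    d2.keys.foldl (fun diffs key =>
      if ¬ d1.contains key then diffs.insert key (none, some (d2.getD key "")) else diffs)
      differences
  differences.items

-- ===== PORT B =====
def compare_cookies_alt (cookies1 : List (String × String)) (cookies2 : List (String × String)) : List (String × Option String × Option String) :=
  let d1 := PySem.Dict.ofList cookies1
  let d2 := PySem.Dict.ofList cookies2
  -- {**cookies1, **cookies2}: a copy of d1 updated with d2's entries
  let u := d2.items.foldl (fun d p => d.insert p.1 p.2) d1
  -- stage 1: the full outer-join table, one row per merged key (.get = get?)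
  let merged := u.keys.foldl (fun d key => d.insert key (d1.get? key, d2.get? key))
    PySem.Dict.empty
  -- stage 2: prune the rows whose two sides are equal
  (merged.items.foldl (fun d p => if p.2.1 ≠ p.2.2 then d.insert p.1 p.2 else d)
    PySem.Dict.empty).items

-- ===== PRECONDITION & SPEC =====
def Spec_compare_cookies (cookies1 : List (String × String)) (cookies2 : List (String × String)) (out : List (String × Option String × Option String)) : Prop := out = compare_cookies_alt cookies1 cookies2
instance (cookies1 : List (String × String)) (cookies2 : List (String × String)) (out : List (String × Option String × Option String)) : Decidable (Spec_compare_cookies cookies1 cookies2 out) := by unfold Spec_compare_cookies; infer_instance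

-- ===== CLAIM (what is proved, stated in full; the proofs are below) =====
def Claim_equal_compare_cookies : Prop := ∀ (cookies1 : List (String × String)) (cookies2 : List (String × String)), Dom_compare_cookies cookies1 cookies2 → Spec_compare_cookies cookies1 cookies2 (compare_cookies cookies1 cookies2)

-- ===== LEMMAS AND PROOFS =====

-- A fold of conditional inserts over distinct keys (fresh for d wherever inserted)
-- appends exactly the corresponding filterMap to d's items.
theorem items_foldl_insert_if {κ ν : Type} [BEq κ] [LawfulBEq κ]
    (l : List κ) (cond : κ → Bool) (v : κ → ν) (d : PySem.Dict κ ν)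
    (nd : l.Nodup) (fresh : ∀ a ∈ l, cond a = true → d.contains a = false) :
    (l.foldl (fun d a => if cond a then d.insert a (v a) else d) d).items
      = d.items ++ l.filterMap (fun a => if cond a then some (a, v a) else none) := by
  induction l generalizing d with
  | nil => simp
  | cons a l ih =>
    simp only [List.foldl_cons, List.filterMap_cons]
    rcases List.nodup_cons.mp nd with ⟨ha, ndl⟩
    cases hc : cond a with
    | false =>
      rw [if_neg (by simp), if_neg (by simp)]
      exact ih d ndl (fun b hb => fresh b (List.mem_cons_of_mem _ hb))
    | true =>
      have fa := fresh a (List.mem_cons_self ..) hc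
      have hfr : ∀ b ∈ l, cond b = true → (d.insert a (v a)).contains b = false := by
        intro b hb hcb
        rw [PySem.Dict.contains_insert]
        have hba : (b == a) = false := by
          simp only [beq_eq_false_iff_ne]; exact fun h => ha (h ▸ hb)
        simp [hba, fresh b (List.mem_cons_of_mem _ hb) hcb]
      rw [if_pos rfl, if_pos rfl, ih (d.insert a (v a)) ndl hfr,
        PySem.Dict.items_insert_of_not_contains _ _ fa]
      simp

-- the same for a fold over arbitrary elements inserting at a key function
theorem items_foldl_insert_if_key {α κ ν : Type} [BEq κ] [LawfulBEq κ]
    (l : List α) (key : α → κ) (cond : α → Bool) (v : α → ν) (d : PySem.Dict κ ν)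
    (nd : (l.map key).Nodup) (fresh : ∀ a ∈ l, cond a = true → d.contains (key a) = false) :
    (l.foldl (fun d a => if cond a then d.insert (key a) (v a) else d) d).items
      = d.items ++ l.filterMap (fun a => if cond a then some (key a, v a) else none) := by
  induction l generalizing d with
  | nil => simp
  | cons a l ih =>
    simp only [List.foldl_cons, List.filterMap_cons]
    rcases List.nodup_cons.mp (by simpa using nd : (key a :: l.map key).Nodup) with ⟨ha, ndl⟩
    cases hc : cond a with
    | false =>
      rw [if_neg (by simp), if_neg (by simp)]
      exact ih d ndl (fun b hb => fresh b (List.mem_cons_of_mem _ hb))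
    | true =>
      have fa := fresh a (List.mem_cons_self ..) hc
      have hfr : ∀ b ∈ l, cond b = true → (d.insert (key a) (v a)).contains (key b) = false := by
        intro b hb hcb
        rw [PySem.Dict.contains_insert]
        have hba : (key b == key a) = false := by
          simp only [beq_eq_false_iff_ne]
          exact fun h => ha (h ▸ List.mem_map_of_mem hb)
        simp [hba, fresh b (List.mem_cons_of_mem _ hb) hcb]
      rw [if_pos rfl, if_pos rfl, ih (d.insert (key a) (v a)) ndl hfr,
        PySem.Dict.items_insert_of_not_contains _ _ fa]
      simp

-- any key contained in A's first-loop accumulator came from the key list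
theorem contains_foldl_insert_if {κ ν : Type} [BEq κ] [LawfulBEq κ]
    (l : List κ) (cond : κ → Bool) (v : κ → ν) (nd : l.Nodup) (a : κ)
    (hc : (l.foldl (fun d a => if cond a then d.insert a (v a) else d)
        PySem.Dict.empty).contains a = true) : a ∈ l := by
  have hmem := (PySem.Dict.contains_iff_mem_keys _ a).mp hc
  simp only [PySem.Dict.keys] at hmem
  rw [items_foldl_insert_if l cond v _ nd
    (fun b _ _ => PySem.Dict.contains_empty b)] at hmem
  simp only [PySem.Dict.empty, List.nil_append, List.mem_map,
    List.mem_filterMap] at hmem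
  obtain ⟨p, ⟨k, hk, hpk⟩, hpa⟩ := hmem
  by_cases hck : cond k = true
  · rw [if_pos hck] at hpk; cases hpk; cases hpa; exact hk
  · rw [if_neg hck] at hpk; cases hpk

theorem get?_of_mem_keys {ν : Type} (d : PySem.Dict String ν) (k : String)
    (h : k ∈ d.keys) : ∃ v, d.get? k = some v := by
  cases hg : d.get? k with
  | none => exact absurd ((PySem.Dict.get?_eq_none_iff_not_mem_keys d k).mp hg) (by simp [h])
  | some v => exact ⟨v, rfl⟩

theorem compare_cookies_spec : Claim_equal_compare_cookies := by
  intro cookies1 cookies2 _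
  simp only [Spec_compare_cookies, compare_cookies, compare_cookies_alt]
  set d1 := PySem.Dict.ofList cookies1 with hd1
  set d2 := PySem.Dict.ofList cookies2 with hd2
  have nd1 : d1.keys.Nodup := PySem.Dict.nodup_keys_ofList _
  have nd2 : d2.keys.Nodup := PySem.Dict.nodup_keys_ofList _
  -- canonical single-condition forms of the three loop bodies
  have hstep1 :
      (fun (diffs : PySem.Dict String (Option String × Option String)) key =>
        if d2.contains key then
          if d1.getD key "" ≠ d2.getD key "" then
            diffs.insert key (some (d1.getD key ""), some (d2.getD key ""))
          else diffs
        else diffs.insert key (some (d1.getD key ""), none))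
      = (fun diffs key =>
          if (if d2.contains key then decide (d1.getD key "" ≠ d2.getD key "") else true) then
            diffs.insert key
              (some (d1.getD key ""), if d2.contains key then some (d2.getD key "") else none)
          else diffs) := by
    funext diffs key
    by_cases h2 : d2.contains key = true
    · by_cases hne : d1.getD key "" = d2.getD key "" <;> simp [h2, hne]
    · simp [h2]
  have hstep2 :
      (fun (diffs : PySem.Dict String (Option String × Option String)) key =>
        if ¬ d1.contains key then diffs.insert key (none, some (d2.getD key "")) else diffs)
      = (fun diffs key =>
          if !d1.contains key then diffs.insert key (none, some (d2.getD key "")) else diffs) := by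
    funext diffs key
    by_cases h1 : d1.contains key = true <;> simp [h1]
  have hstepB :
      (fun (d : PySem.Dict String (Option String × Option String))
          (p : String × Option String × Option String) =>
        if p.2.1 ≠ p.2.2 then d.insert p.1 p.2 else d)
      = (fun d p => if decide (p.2.1 ≠ p.2.2) then d.insert p.1 p.2 else d) := by
    funext d p
    by_cases h : p.2.1 = p.2.2 <;> simp [h]
  rw [hstep1, hstep2, hstepB]
  -- the first A-loop
  have h1 :
      (d1.keys.foldl (fun diffs key =>
          if (if d2.contains key then decide (d1.getD key "" ≠ d2.getD key "") else true) then
            diffs.insert key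
              (some (d1.getD key ""), if d2.contains key then some (d2.getD key "") else none)
          else diffs) PySem.Dict.empty).items
        = d1.keys.filterMap (fun key =>
            if (if d2.contains key then decide (d1.getD key "" ≠ d2.getD key "") else true) then
              some (key, some (d1.getD key ""),
                if d2.contains key then some (d2.getD key "") else none)
            else none) := by
    rw [items_foldl_insert_if _ _ _ _ nd1 (fun a _ _ => PySem.Dict.contains_empty a)]
    simp [PySem.Dict.empty]
  -- keys produced by the first A-loop all come from d1
  have hfresh2 : ∀ a ∈ d2.keys, (!d1.contains a) = true →
      (d1.keys.foldl (fun diffs key =>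
          if (if d2.contains key then decide (d1.getD key "" ≠ d2.getD key "") else true) then
            diffs.insert key
              (some (d1.getD key ""), if d2.contains key then some (d2.getD key "") else none)
          else diffs) PySem.Dict.empty).contains a = false := by
    intro a _ hna
    by_contra hc
    rw [Bool.not_eq_false] at hc
    have : a ∈ d1.keys := contains_foldl_insert_if _ _ _ nd1 a hc
    rw [(PySem.Dict.contains_iff_mem_keys d1 a).mpr this] at hna
    simp at hna
  -- second A-loop on top of the first
  rw [items_foldl_insert_if _ _ _ _ nd2 hfresh2, h1]
  -- B, stage 0: the merged key list {**cookies1, **cookies2}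
  have hu : (d2.items.foldl (fun d p => d.insert p.1 p.2) d1).keys
      = d1.keys ++ d2.keys.filter (fun k => !(d1.contains k)) := by
    rw [PySem.Dict.keys_foldl_insert_key]
    have hmapfst : d2.items.map Prod.fst = d2.keys := rfl
    rw [hmapfst, PySem.Set.update_eq_append_filter,
      PySem.Set.ofList_eq_self_of_nodup d2.keys nd2]
    congr 1
    refine List.filter_congr (fun k _ => ?_)
    have : PySem.Set.contains d1.keys k = d1.contains k := by
      by_cases hk : k ∈ d1.keys
      · rw [(PySem.Set.contains_iff _ _).mpr hk,
          (PySem.Dict.contains_iff_mem_keys d1 k).mpr hk]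
      · have c1 : PySem.Set.contains d1.keys k = false := by
          cases h : PySem.Set.contains d1.keys k
          · rfl
          · exact absurd ((PySem.Set.contains_iff _ _).mp h) hk
        have c2 : d1.contains k = false := by
          cases h : d1.contains k
          · rfl
          · exact absurd ((PySem.Dict.contains_iff_mem_keys d1 k).mp h) hk
        rw [c1, c2]
    rw [this]
  -- the merged key list is duplicate-free
  have hdisj : d1.keys.Disjoint (d2.keys.filter (fun k => !(d1.contains k))) := by
    intro a ha haf
    have hp := List.of_mem_filter haf
    rw [(PySem.Dict.contains_iff_mem_keys d1 a).mpr ha] at hp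
    simp at hp
  have ndB : (d1.keys ++ d2.keys.filter (fun k => !(d1.contains k))).Nodup :=
    List.Nodup.append nd1 (nd2.filter _) hdisj
  -- B, stage 1: the outer-join table lists one row per merged key
  have hmerged : ((d2.items.foldl (fun d p => d.insert p.1 p.2) d1).keys.foldl
        (fun d key => d.insert key (d1.get? key, d2.get? key)) PySem.Dict.empty).items
      = (d1.keys ++ d2.keys.filter (fun k => !(d1.contains k))).map
          (fun key => (key, (d1.get? key, d2.get? key))) := by
    rw [hu, PySem.Dict.items_foldl_insert_fresh _ _ _ _
      (fun a _ => PySem.Dict.contains_empty a) (by simpa using ndB)]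
    simp [PySem.Dict.empty]
  -- B, stage 2: pruning the equal rows
  rw [items_foldl_insert_if_key _ Prod.fst
      (fun p : String × Option String × Option String => decide (p.2.1 ≠ p.2.2)) Prod.snd _
      (by rw [hmerged]; simpa [List.map_map, Function.comp_def] using ndB)
      (fun a _ _ => PySem.Dict.contains_empty a.1),
    hmerged]
  simp only [PySem.Dict.empty, List.nil_append, List.filterMap_map, List.filterMap_append]
  -- compare the two halves pointwise
  congr 1
  · refine List.filterMap_congr (fun k hk => ?_)
    obtain ⟨v, hv⟩ := get?_of_mem_keys d1 k hk
    by_cases h2 : d2.contains k = true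
    · obtain ⟨w, hw⟩ := get?_of_mem_keys d2 k ((PySem.Dict.contains_iff_mem_keys d2 k).mp h2)
      by_cases hne : v = w <;>
        simp [h2, hv, hw, PySem.Dict.getD_eq_get?_getD, hne, Function.comp]
    · have h2n : d2.get? k = none := (PySem.Dict.get?_eq_none_iff_contains d2 k).mpr
        (by simpa using h2)
      simp [h2, hv, h2n, PySem.Dict.getD_eq_get?_getD, Function.comp]
  · rw [List.filterMap_filter]
    refine List.filterMap_congr (fun k hk => ?_)
    obtain ⟨w, hw⟩ := get?_of_mem_keys d2 k hk
    by_cases h1 : d1.contains k = true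
    · simp [h1]
    · have h1n : d1.get? k = none := (PySem.Dict.get?_eq_none_iff_contains d1 k).mpr
        (by simpa using h1)
      simp [h1, h1n, hw, PySem.Dict.getD_eq_get?_getD, Function.comp]
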